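-- pv_equiv track=rewrite | github.com/Yuffster/lawpy | lawpy/session.py | safe_merge
-- ===== SOURCE A (Python) =====
-- def safe_merge(d1, d2):
--     keys = set(d1.keys()).union(set(d2.keys()))
--     result = {}
--     for k in keys:
--         if k in d2 and d2[k]:
--             result.update({k: d2[k]})
--         elif k in d1 and d1[k]:
--             result.update({k: d1[k]})
--         else:
--             result.update({k: None})
--     return result
-- ===== SOURCE B (Python) =====
-- def safe_merge(d1, d2):
--     result = {k: None for k in set(d1) | set(d2)}
--     for k, v in d1.items():
--         if v:
--             result[k] = v
--     for k, v in d2.items():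
--         if v:
--             result[k] = v
--     return result
-- ===== Notes on version B (the rewrite author's own statement) =====
-- stated objective: alternative
-- what changed: Replaces A's single loop over the key set with a per-key three-way branch by a layered overlay: a default pass mapping every key to None, then a truthy-filtered pass over d1, then a truthy-filtered pass over d2 whose last write enforces d2's precedence.
import Mathlib
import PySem

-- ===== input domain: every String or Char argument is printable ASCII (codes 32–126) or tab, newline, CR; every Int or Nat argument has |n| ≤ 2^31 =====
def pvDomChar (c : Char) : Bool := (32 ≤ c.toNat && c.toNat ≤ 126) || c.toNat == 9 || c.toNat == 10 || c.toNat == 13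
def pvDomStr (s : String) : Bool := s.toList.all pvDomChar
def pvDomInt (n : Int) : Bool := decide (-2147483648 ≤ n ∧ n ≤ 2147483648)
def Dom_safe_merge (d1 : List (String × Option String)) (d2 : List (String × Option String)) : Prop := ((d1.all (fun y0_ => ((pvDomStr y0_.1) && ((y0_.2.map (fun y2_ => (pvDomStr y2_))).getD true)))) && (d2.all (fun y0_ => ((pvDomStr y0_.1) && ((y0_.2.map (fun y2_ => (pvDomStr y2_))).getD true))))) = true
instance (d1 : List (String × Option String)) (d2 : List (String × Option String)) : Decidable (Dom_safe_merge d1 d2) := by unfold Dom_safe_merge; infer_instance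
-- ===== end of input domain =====

-- B replaces A's per-key three-way branch by a layered overlay (default-None pass, then truthy d1 pass, then truthy d2 pass); alternative decomposition, same cost.

-- Python truthiness of an Optional[str] value
def pvTruthy (v : Option String) : Bool :=
  match v with
  | some s => s ≠ ""
  | none => false

-- ===== PORT A =====
def safe_merge (d1 : List (String × Option String)) (d2 : List (String × Option String)) : List (String × Option String) :=
  let D1 := PySem.Dict.ofList d1
  let D2 := PySem.Dict.ofList d2
  let keys := PySem.Set.union (PySem.Set.ofList (PySem.Dict.keys D1)) (PySem.Set.ofList (PySem.Dict.keys D2))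
  let result := keys.foldl (fun r k =>
    if PySem.Dict.contains D2 k && pvTruthy (PySem.Dict.getD D2 k none) then
      PySem.Dict.insert r k (PySem.Dict.getD D2 k none)
    else if PySem.Dict.contains D1 k && pvTruthy (PySem.Dict.getD D1 k none) then
      PySem.Dict.insert r k (PySem.Dict.getD D1 k none)
    else
      PySem.Dict.insert r k none) PySem.Dict.empty
  result.items

-- ===== PORT B =====
-- one truthy-filtered overlay pass:  for k, v in items: if v: result[k] = v
def pvOverlay (r : PySem.Dict String (Option String)) (items : List (String × Option String)) : PySem.Dict String (Option String) :=
  items.foldl (fun r p => if pvTruthy p.2 then PySem.Dict.insert r p.1 p.2 else r) r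

def safe_merge_alt (d1 : List (String × Option String)) (d2 : List (String × Option String)) : List (String × Option String) :=
  let D1 := PySem.Dict.ofList d1
  let D2 := PySem.Dict.ofList d2
  let allKeys := PySem.Set.union (PySem.Set.ofList (PySem.Dict.keys D1)) (PySem.Set.ofList (PySem.Dict.keys D2))
  let base := allKeys.foldl (fun r k => PySem.Dict.insert r k (none : Option String)) (PySem.Dict.empty : PySem.Dict String (Option String))
  (pvOverlay (pvOverlay base D1.items) D2.items).items

-- ===== PRECONDITION & SPEC =====
def Spec_safe_merge (d1 : List (String × Option String)) (d2 : List (String × Option String)) (out : List (String × Option String)) : Prop := out = safe_merge_alt d1 d2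
instance (d1 : List (String × Option String)) (d2 : List (String × Option String)) (out : List (String × Option String)) : Decidable (Spec_safe_merge d1 d2 out) := by unfold Spec_safe_merge; infer_instance

-- ===== CLAIM (what is proved, stated in full; the proofs are below) =====
def Claim_equal_safe_merge : Prop := ∀ (d1 : List (String × Option String)) (d2 : List (String × Option String)), Dom_safe_merge d1 d2 → Spec_safe_merge d1 d2 (safe_merge d1 d2)

-- ===== LEMMAS AND PROOFS =====

-- the value A stores for key k
def pvValA (D1 D2 : PySem.Dict String (Option String)) (k : String) : Option String :=
  if PySem.Dict.contains D2 k && pvTruthy (PySem.Dict.getD D2 k none) then PySem.Dict.getD D2 k none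
  else if PySem.Dict.contains D1 k && pvTruthy (PySem.Dict.getD D1 k none) then PySem.Dict.getD D1 k none
  else none

theorem pvA_items (D1 D2 : PySem.Dict String (Option String)) (keys : List String)
    (hnd : keys.Nodup) :
    (keys.foldl (fun r k =>
      if PySem.Dict.contains D2 k && pvTruthy (PySem.Dict.getD D2 k none) then
        PySem.Dict.insert r k (PySem.Dict.getD D2 k none)
      else if PySem.Dict.contains D1 k && pvTruthy (PySem.Dict.getD D1 k none) then
        PySem.Dict.insert r k (PySem.Dict.getD D1 k none)
      else
        PySem.Dict.insert r k none) PySem.Dict.empty).items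
    = keys.map (fun k => (k, pvValA D1 D2 k)) := by
  have hfun : (fun (r : PySem.Dict String (Option String)) (k : String) =>
      if PySem.Dict.contains D2 k && pvTruthy (PySem.Dict.getD D2 k none) then
        PySem.Dict.insert r k (PySem.Dict.getD D2 k none)
      else if PySem.Dict.contains D1 k && pvTruthy (PySem.Dict.getD D1 k none) then
        PySem.Dict.insert r k (PySem.Dict.getD D1 k none)
      else
        PySem.Dict.insert r k none)
      = (fun (r : PySem.Dict String (Option String)) (k : String) =>
        PySem.Dict.insert r k (pvValA D1 D2 k)) := by
    funext r k
    simp only [pvValA]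
    split_ifs <;> rfl
  rw [hfun]
  have := PySem.Dict.items_foldl_insert_fresh (l := keys) (k := fun k => k)
      (v := fun k => pvValA D1 D2 k) (d := PySem.Dict.empty)
      (by intro a _; exact PySem.Dict.contains_empty a) (by simpa using hnd)
  simpa using this

-- base pass: items are (k, none) for k in keys
theorem pvBase_items (keys : List String) (hnd : keys.Nodup) :
    (keys.foldl (fun r k => PySem.Dict.insert r k (none : Option String)) (PySem.Dict.empty : PySem.Dict String (Option String))).items
    = keys.map (fun k => (k, (none : Option String))) := by
  have := PySem.Dict.items_foldl_insert_fresh (l := keys) (k := fun k => k)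
      (v := fun _ => (none : Option String)) (d := PySem.Dict.empty)
      (by intro a _; exact PySem.Dict.contains_empty a) (by simpa using hnd)
  simpa using this

-- overlay pass keeps the key list when every overlaid key is already present
theorem pvOverlay_keys (l : List (String × Option String)) (r : PySem.Dict String (Option String))
    (h : ∀ p ∈ l, PySem.Dict.contains r p.1 = true) :
    (pvOverlay r l).keys = r.keys := by
  induction l generalizing r with
  | nil => rfl
  | cons p l ih =>
    have hp : PySem.Dict.contains r p.1 = true := h p (List.mem_cons_self)
    have hkeys : (if pvTruthy p.2 then PySem.Dict.insert r p.1 p.2 else r).keys = r.keys := by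
      split
      · exact PySem.Dict.keys_insert_of_contains r p.2 hp
      · rfl
    have h' : ∀ q ∈ l, PySem.Dict.contains (if pvTruthy p.2 then PySem.Dict.insert r p.1 p.2 else r) q.1 = true := by
      intro q hq
      have := h q (List.mem_cons_of_mem _ hq)
      rw [PySem.Dict.contains_iff_mem_keys] at this ⊢
      rw [hkeys]; exact this
    simp only [pvOverlay, List.foldl_cons]
    rw [show (l.foldl (fun r p => if pvTruthy p.2 then PySem.Dict.insert r p.1 p.2 else r)
        (if pvTruthy p.2 then PySem.Dict.insert r p.1 p.2 else r)) = pvOverlay (if pvTruthy p.2 then PySem.Dict.insert r p.1 p.2 else r) l from rfl]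
    rw [ih _ h', hkeys]

-- lookup after an overlay pass: last truthy write wins
theorem pvOverlay_get? (l : List (String × Option String)) (r : PySem.Dict String (Option String)) (k : String) :
    PySem.Dict.get? (pvOverlay r l) k
    = match l.reverse.find? (fun p => p.1 == k && pvTruthy p.2) with
      | some p => some p.2
      | none => PySem.Dict.get? r k := by
  induction l using List.reverseRecOn generalizing r with
  | nil => rfl
  | append_singleton l p ih =>
    simp only [pvOverlay, List.foldl_append, List.foldl_cons, List.foldl_nil,
      List.reverse_append, List.reverse_cons, List.reverse_nil, List.nil_append,
      List.cons_append, List.find?_cons]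
    by_cases hk : p.1 = k
    · subst hk
      by_cases ht : pvTruthy p.2
      · simp [ht, PySem.Dict.get?_insert_self]
      · simpa [ht] using ih r
    · have hbeq : (p.1 == k) = false := by simpa using hk
      by_cases ht : pvTruthy p.2
      · simp only [ht, if_true, hbeq, Bool.false_and]
        rw [show (PySem.Dict.insert (l.foldl (fun r p => if pvTruthy p.2 then PySem.Dict.insert r p.1 p.2 else r) r) p.1 p.2).get? k
            = (l.foldl (fun r p => if pvTruthy p.2 then PySem.Dict.insert r p.1 p.2 else r) r).get? k from
          PySem.Dict.get?_insert_of_ne _ _ (fun h => hk h.symm)]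
        exact ih r
      · simpa [ht, hbeq] using ih r

-- on a nodup-keys items list the truthy find? is the dict lookup filtered by truthiness
theorem pvFind_truthy (l : List (String × Option String)) (hnd : (l.map Prod.fst).Nodup) (k : String) :
    l.reverse.find? (fun p => p.1 == k && pvTruthy p.2)
    = match PySem.Dict.get? (PySem.Dict.mk l) k with
      | some v => if pvTruthy v then some (k, v) else none
      | none => none := by
  induction l with
  | nil => rfl
  | cons x l ih =>
    have hx : x.1 ∉ l.map Prod.fst := by
      simpa using (List.nodup_cons.mp hnd).1
    have hnd' : (l.map Prod.fst).Nodup := (List.nodup_cons.mp hnd).2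
    simp only [List.reverse_cons, List.find?_append]
    rw [ih hnd']
    by_cases hk : x.1 = k
    · subst hk
      have hnone : PySem.Dict.get? (PySem.Dict.mk l) x.1 = none := by
        rw [PySem.Dict.get?_eq_none_iff_not_mem_keys]
        simpa [PySem.Dict.keys] using hx
      rw [hnone]
      have : PySem.Dict.get? (PySem.Dict.mk (x :: l)) x.1 = some x.2 := by
        rw [PySem.Dict.get?_mk_cons]; simp
      rw [this]
      by_cases ht : pvTruthy x.2 <;> simp [List.find?, ht]
    · have hbeq : (x.1 == k) = false := by simpa using hk
      rw [PySem.Dict.get?_mk_cons, hbeq]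
      simp only [Bool.false_eq_true, if_false]
      cases hg : PySem.Dict.get? (PySem.Dict.mk l) k with
      | none => simp [List.find?, hbeq]
      | some v =>
        by_cases ht : pvTruthy v <;> simp [List.find?, hbeq, ht]

-- ===== VERDICT (by name: the statement is the Claim_ definition above) =====
-- values agree pointwise on the key set
theorem pvVal_eq (d1 d2 : List (String × Option String)) (k : String)
    (hk : k ∈ PySem.Set.union (PySem.Set.ofList (PySem.Dict.ofList d1).keys) (PySem.Set.ofList (PySem.Dict.ofList d2).keys)) :
    (pvOverlay (pvOverlay
        ((PySem.Set.union (PySem.Set.ofList (PySem.Dict.ofList d1).keys) (PySem.Set.ofList (PySem.Dict.ofList d2).keys)).foldl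
          (fun r k => PySem.Dict.insert r k (none : Option String)) (PySem.Dict.empty : PySem.Dict String (Option String)))
        (PySem.Dict.ofList d1).items) (PySem.Dict.ofList d2).items).getD k none
    = pvValA (PySem.Dict.ofList d1) (PySem.Dict.ofList d2) k := by
  have hndk : ((PySem.Set.ofList (PySem.Dict.ofList d1).keys).union (PySem.Set.ofList (PySem.Dict.ofList d2).keys)).Nodup :=
    PySem.Set.nodup_union _ _ (PySem.Set.nodup_ofList _)
  have hbase := pvBase_items _ hndk
  have hbkeys : (((PySem.Set.ofList (PySem.Dict.ofList d1).keys).union (PySem.Set.ofList (PySem.Dict.ofList d2).keys)).foldl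
      (fun r k => PySem.Dict.insert r k (none : Option String)) (PySem.Dict.empty : PySem.Dict String (Option String))).keys
      = (PySem.Set.ofList (PySem.Dict.ofList d1).keys).union (PySem.Set.ofList (PySem.Dict.ofList d2).keys) := by
    show (_ : PySem.Dict String (Option String)).items.map Prod.fst = _
    rw [hbase, List.map_map]
    exact List.map_id' _
  have hbget : PySem.Dict.get? (((PySem.Set.ofList (PySem.Dict.ofList d1).keys).union (PySem.Set.ofList (PySem.Dict.ofList d2).keys)).foldl
      (fun r k => PySem.Dict.insert r k (none : Option String)) (PySem.Dict.empty : PySem.Dict String (Option String))) k = some none := by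
    apply PySem.Dict.get?_of_mem_items
    · rw [hbase]
      exact List.mem_map_of_mem hk
    · rw [hbkeys]; exact hndk
  rw [PySem.Dict.getD_eq_get?_getD, pvOverlay_get?, pvFind_truthy _ (PySem.Dict.nodup_keys_ofList d2) k]
  cases hg2 : PySem.Dict.get? (PySem.Dict.ofList d2) k with
  | some v2 =>
    by_cases ht2 : pvTruthy v2
    · simp [pvValA, PySem.Dict.contains_eq_isSome_get?, PySem.Dict.getD_eq_get?_getD, hg2, ht2]
    · simp only [ht2]
      rw [pvOverlay_get?, pvFind_truthy _ (PySem.Dict.nodup_keys_ofList d1) k]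
      cases hg1 : PySem.Dict.get? (PySem.Dict.ofList d1) k with
      | some v1 =>
        by_cases ht1 : pvTruthy v1
        · simp [pvValA, PySem.Dict.contains_eq_isSome_get?, PySem.Dict.getD_eq_get?_getD, hg2, ht2, hg1, ht1]
        · simp only [ht1]
          rw [hbget]
          simp [pvValA, PySem.Dict.contains_eq_isSome_get?, PySem.Dict.getD_eq_get?_getD, hg2, ht2, hg1, ht1]
      | none =>
        rw [hbget]
        simp [pvValA, PySem.Dict.contains_eq_isSome_get?, PySem.Dict.getD_eq_get?_getD, hg2, ht2, hg1]
  | none =>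
    rw [pvOverlay_get?, pvFind_truthy _ (PySem.Dict.nodup_keys_ofList d1) k]
    cases hg1 : PySem.Dict.get? (PySem.Dict.ofList d1) k with
    | some v1 =>
      by_cases ht1 : pvTruthy v1
      · simp [pvValA, PySem.Dict.contains_eq_isSome_get?, PySem.Dict.getD_eq_get?_getD, hg2, hg1, ht1]
      · simp only [ht1]
        rw [hbget]
        simp [pvValA, PySem.Dict.contains_eq_isSome_get?, PySem.Dict.getD_eq_get?_getD, hg2, hg1, ht1]
    | none =>
      rw [hbget]
      simp [pvValA, PySem.Dict.contains_eq_isSome_get?, PySem.Dict.getD_eq_get?_getD, hg2, hg1]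

theorem safe_merge_spec : Claim_equal_safe_merge := by
  unfold Claim_equal_safe_merge Spec_safe_merge
  intro d1 d2 _
  simp only [safe_merge, safe_merge_alt]
  have hndk : (PySem.Set.union (PySem.Set.ofList (PySem.Dict.ofList d1).keys) (PySem.Set.ofList (PySem.Dict.ofList d2).keys)).Nodup :=
    PySem.Set.nodup_union _ _ (PySem.Set.nodup_ofList _)
  have hbase := pvBase_items _ hndk
  have hbkeys : ((PySem.Set.union (PySem.Set.ofList (PySem.Dict.ofList d1).keys) (PySem.Set.ofList (PySem.Dict.ofList d2).keys)).foldl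
      (fun r k => PySem.Dict.insert r k (none : Option String)) (PySem.Dict.empty : PySem.Dict String (Option String))).keys
      = PySem.Set.union (PySem.Set.ofList (PySem.Dict.ofList d1).keys) (PySem.Set.ofList (PySem.Dict.ofList d2).keys) := by
    show (_ : PySem.Dict String (Option String)).items.map Prod.fst = _
    rw [hbase, List.map_map]
    exact List.map_id' _
  have h1 : ∀ p ∈ (PySem.Dict.ofList d1).items,
      PySem.Dict.contains ((PySem.Set.union (PySem.Set.ofList (PySem.Dict.ofList d1).keys) (PySem.Set.ofList (PySem.Dict.ofList d2).keys)).foldl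
        (fun r k => PySem.Dict.insert r k (none : Option String)) (PySem.Dict.empty : PySem.Dict String (Option String))) p.1 = true := by
    intro p hp
    rw [PySem.Dict.contains_iff_mem_keys, hbkeys]
    exact (PySem.Set.mem_union _ _ _).mpr (Or.inl ((PySem.Set.mem_ofList _ _).mpr (PySem.Dict.mem_keys_of_mem_items _ hp)))
  have ho1keys := pvOverlay_keys _ _ h1
  have h2 : ∀ p ∈ (PySem.Dict.ofList d2).items,
      PySem.Dict.contains (pvOverlay ((PySem.Set.union (PySem.Set.ofList (PySem.Dict.ofList d1).keys) (PySem.Set.ofList (PySem.Dict.ofList d2).keys)).foldl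
        (fun r k => PySem.Dict.insert r k (none : Option String)) (PySem.Dict.empty : PySem.Dict String (Option String))) (PySem.Dict.ofList d1).items) p.1 = true := by
    intro p hp
    rw [PySem.Dict.contains_iff_mem_keys, ho1keys, hbkeys]
    exact (PySem.Set.mem_union _ _ _).mpr (Or.inr ((PySem.Set.mem_ofList _ _).mpr (PySem.Dict.mem_keys_of_mem_items _ hp)))
  have ho2keys := pvOverlay_keys _ _ h2
  rw [pvA_items _ _ _ hndk]
  rw [PySem.Dict.items_eq_map_keys _ (by rw [ho2keys, ho1keys, hbkeys]; exact hndk) none]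
  rw [ho2keys, ho1keys, hbkeys]
  symm
  apply List.map_congr_left
  intro k hk
  rw [pvVal_eq d1 d2 k hk]
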